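-- pv_equiv track=rewrite | github.com/shlomilory/F5-comparison-project | lambda-package/lambda_function.py | parse_config_block
-- ===== SOURCE A (Python) =====
-- from typing import List, Dict, Any, Tuple
--
-- def parse_config_block(block_content: str) -> Dict[str, str]:
--     """Parse configuration block into key-value pairs"""
--     config = {}
--     lines = [line.strip() for line in block_content.strip().split('\n')]
--
--     block = []
--     brace_count = 0
--
--     for line in lines:
--         for char in line:
--             if char == '{':
--                 brace_count += 1
--             elif char == '}':
--                 brace_count -= 1
--
--         if brace_count == 0:
--             block.append(line)
--
--     for line in block:
--         if not line or line in ['{', '}']: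
--             continue
--
--         if ' ' in line:
--             parts = line.split(None, 1)
--             if len(parts) == 2:
--                 key, value = parts
--                 config[key] = value.strip()
--             elif len(parts) == 1:
--                 config[parts[0]] = '{'
--
--     return config
-- ===== SOURCE B (Python) =====
-- def parse_config_block(block_content: str):
--     """Parse configuration block into key-value pairs.
--
--     Character-level streaming scanner: one pass over the characters of the
--     stripped text (with a sentinel newline), maintaining the brace depth and
--     the current line buffer; a line is parsed the moment its newline arrives.
--     """
--     config = {}
--     depth = 0
--     buf = []
--     for ch in block_content.strip() + '\n':
--         if ch == '\n':
--             line = ''.join(buf).strip()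
--             buf = []
--             if depth == 0 and ' ' in line:
--                 key, value = line.split(None, 1)
--                 config[key] = value.strip()
--         else:
--             if ch == '{':
--                 depth += 1
--             elif ch == '}':
--                 depth -= 1
--             buf.append(ch)
--     return config
-- ===== Notes on version B (the rewrite author's own statement) =====
-- stated objective: alternative
-- what changed: B replaces A's split-into-lines plus two sequential line passes (collect depth-0 lines into a block list, then parse that list) by a single character-level streaming scanner: one loop over the characters of the stripped text with a sentinel newline, maintaining the brace depth and a current-line buffer, parsing each line the moment its newline arrives; the line list, the block list, the per-line brace pass, the redundant empty/brace-only skip and the unreachable one-part split branch all disappear.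
import Mathlib
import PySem

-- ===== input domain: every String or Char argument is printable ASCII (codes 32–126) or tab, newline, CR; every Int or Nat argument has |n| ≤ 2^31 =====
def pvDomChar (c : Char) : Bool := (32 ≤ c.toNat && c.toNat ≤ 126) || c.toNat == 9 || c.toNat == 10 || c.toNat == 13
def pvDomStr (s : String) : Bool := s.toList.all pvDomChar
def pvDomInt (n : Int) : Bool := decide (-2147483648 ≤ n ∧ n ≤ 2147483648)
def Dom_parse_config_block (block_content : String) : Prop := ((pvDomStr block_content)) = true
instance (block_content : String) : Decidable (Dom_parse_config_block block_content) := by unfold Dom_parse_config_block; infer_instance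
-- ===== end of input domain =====

-- B replaces A's split-into-lines + two line passes by a single character-level streaming
-- scanner (depth and line buffer updated per character, a line parsed at its newline); simpler
-- decomposition, same result.

-- ===== PORT A =====
-- inner `for char in line` loop of A's first pass
def pvBraceStep (bc : Int) (c : Char) : Int :=
  if c = '{' then bc + 1 else if c = '}' then bc - 1 else bc

-- body of A's second `for line in block` loop
def pvAStep2 (cfg : PySem.Dict (List Char) (List Char)) (line : List Char) :
    PySem.Dict (List Char) (List Char) :=
  if line = [] ∨ line = ['{'] ∨ line = ['}'] then cfg
  else if PySem.Chars.isIn [' '] line then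
    match PySem.Chars.split₀Max line 1 with
    | [k, v] => cfg.insert k (PySem.Chars.strip v)
    | [k] => cfg.insert k ['{']
    | _ => cfg
  else cfg

-- body of A's first `for line in lines` loop (state: block list × brace_count)
def pvAStep1 (st : List (List Char) × Int) (line : List Char) : List (List Char) × Int :=
  let bc := line.foldl pvBraceStep st.2
  (if bc = 0 then st.1 ++ [line] else st.1, bc)

def parse_config_block (block_content : String) : List (String × String) :=
  let lines := (PySem.Chars.splitOn (PySem.Chars.strip block_content.toList) ['\n']).map
      PySem.Chars.strip
  let fst := lines.foldl pvAStep1 ([], 0)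
  let config := fst.1.foldl pvAStep2 (PySem.Dict.mk [])
  config.items.map (fun p => (String.ofList p.1, String.ofList p.2))

-- ===== PORT B =====
-- body of B's character loop (state: config × depth × buf); at '\n' the buffered line is
-- stripped and parsed (`key, value = line.split(None, 1)` is the [k, v] arm; the `_` arm is
-- only the totality guard for the unpacking); any other char updates depth and joins the buffer
def pvBStep (st : PySem.Dict (List Char) (List Char) × Int × List Char) (ch : Char) :
    PySem.Dict (List Char) (List Char) × Int × List Char :=
  if ch = '\n' then
    let line := PySem.Chars.strip st.2.2
    let cfg :=
      if st.2.1 = 0 ∧ PySem.Chars.isIn [' '] line = true then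
        match PySem.Chars.split₀Max line 1 with
        | [k, v] => st.1.insert k (PySem.Chars.strip v)
        | _ => st.1
      else st.1
    (cfg, st.2.1, [])
  else
    let depth := if ch = '{' then st.2.1 + 1 else if ch = '}' then st.2.1 - 1 else st.2.1
    (st.1, depth, st.2.2 ++ [ch])

def parse_config_block_alt (block_content : String) : List (String × String) :=
  let res := (PySem.Chars.strip block_content.toList ++ ['\n']).foldl pvBStep
      (PySem.Dict.mk [], 0, [])
  res.1.items.map (fun p => (String.ofList p.1, String.ofList p.2))

-- ===== PRECONDITION & SPEC =====
def Spec_parse_config_block (block_content : String) (out : List (String × String)) : Prop := out = parse_config_block_alt block_content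
instance (block_content : String) (out : List (String × String)) : Decidable (Spec_parse_config_block block_content out) := by unfold Spec_parse_config_block; infer_instance

-- ===== CLAIM (what is proved, stated in full; the proofs are below) =====
def Claim_equal_parse_config_block : Prop := ∀ (block_content : String), Dom_parse_config_block block_content → Spec_parse_config_block block_content (parse_config_block block_content)

-- ===== LEMMAS AND PROOFS =====

-- proof-only reference splitter: Python's split('\n') as plain structural recursion
def pvSplitNL : List Char → List (List Char)
  | [] => [[]]
  | c :: t =>
    if c = '\n' then [] :: pvSplitNL t
    else match pvSplitNL t with
      | h :: r => (c :: h) :: r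
      | [] => [[c]]

lemma pvSplitNL_ne_nil (l : List Char) : pvSplitNL l ≠ [] := by
  cases l with
  | nil => simp [pvSplitNL]
  | cons c t =>
    unfold pvSplitNL
    split
    · simp
    · rcases h : pvSplitNL t with _ | ⟨a, b⟩ <;> simp

-- splitOn with separator '\n' is pvSplitNL
lemma splitOn_go_spec : ∀ (l : List Char) (fuel : Nat) (cur : List Char)
    (acc : List (List Char)), l.length ≤ fuel →
    PySem.Chars.splitOn.go ['\n'] fuel l cur acc =
      acc.reverse ++ (match pvSplitNL l with
        | h :: r => (cur.reverse ++ h) :: r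
        | [] => [cur.reverse]) := by
  intro l
  induction l with
  | nil =>
    intro fuel cur acc _
    cases fuel <;> simp [PySem.Chars.splitOn.go, pvSplitNL]
  | cons c t ih =>
    intro fuel cur acc hf
    cases fuel with
    | zero => simp at hf
    | succ n =>
      simp only [List.length_cons, Nat.add_le_add_iff_right] at hf
      rw [PySem.Chars.splitOn.go]
      by_cases hc : c = '\n'
      · subst hc
        have hp : (['\n'] : List Char).isPrefixOf ('\n' :: t) = true := by
          simp [List.isPrefixOf]
        rw [if_pos hp]
        simp only [List.length_cons, List.length_nil, List.drop_succ_cons, List.drop_zero]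
        rw [ih n [] (cur.reverse :: acc) hf]
        simp [pvSplitNL]
        rcases h : pvSplitNL t with _ | ⟨a, b⟩
        · exact absurd h (pvSplitNL_ne_nil t)
        · simp
      · have hp : (['\n'] : List Char).isPrefixOf (c :: t) = false := by
          simp [List.isPrefixOf]
          exact fun h => hc h.symm
        rw [hp]
        simp only [Bool.false_eq_true, if_false]
        rw [ih n (c :: cur) acc hf]
        rcases h : pvSplitNL t with _ | ⟨a, b⟩
        · exact absurd h (pvSplitNL_ne_nil t)
        · simp [pvSplitNL, hc, h]

lemma splitOn_eq_pvSplitNL (l : List Char) :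
    PySem.Chars.splitOn l ['\n'] = pvSplitNL l := by
  show PySem.Chars.splitOn.go ['\n'] (l.length + 1) l [] [] = _
  rw [splitOn_go_spec l (l.length + 1) [] [] (by omega)]
  rcases h : pvSplitNL l with _ | ⟨a, b⟩
  · exact absurd h (pvSplitNL_ne_nil l)
  · simp

-- A's character loop as counts
lemma braceStep_eq_countP (s : List Char) (bc : Int) :
    s.foldl pvBraceStep bc =
      bc + (s.countP (· == '{') : Int) - (s.countP (· == '}') : Int) := by
  induction s generalizing bc with
  | nil => simp
  | cons a t ih =>
    rw [List.foldl_cons, ih]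
    by_cases h1 : a = '{' <;> by_cases h2 : a = '}' <;>
      simp [pvBraceStep, h1, h2] <;> omega

-- stripping a line does not change its brace counts
lemma countP_strip (r : List Char) (c : Char) (hc : PySem.Chars.isspace c = false) :
    (PySem.Chars.strip r).countP (· == c) = r.countP (· == c) := by
  have key : ∀ (u : List Char), (u.dropWhile PySem.Chars.isspace).countP (· == c) =
      u.countP (· == c) := by
    intro u
    conv_rhs => rw [← List.takeWhile_append_dropWhile (p := PySem.Chars.isspace) (l := u)]
    rw [List.countP_append]
    have hz : (u.takeWhile PySem.Chars.isspace).countP (· == c) = 0 := by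
      rw [List.countP_eq_zero]
      intro x hx
      have hsp := List.mem_takeWhile_imp hx
      intro hb
      rw [eq_of_beq hb, hc] at hsp
      exact Bool.false_ne_true hsp
    omega
  simp only [PySem.Chars.strip, PySem.Chars.rstrip, PySem.Chars.lstrip]
  rw [List.countP_reverse, key, List.countP_reverse, key]

lemma braceFold_strip (r : List Char) (bc : Int) :
    (PySem.Chars.strip r).foldl pvBraceStep bc = r.foldl pvBraceStep bc := by
  rw [braceStep_eq_countP, braceStep_eq_countP,
    countP_strip r '{' (by decide), countP_strip r '}' (by decide)]

-- a string of the form `strip r` starts and ends with a non-space character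
lemma stripped_strip (r : List Char) :
    (PySem.Chars.strip r).dropWhile PySem.Chars.isspace = PySem.Chars.strip r ∧
    (PySem.Chars.strip r).reverse.dropWhile PySem.Chars.isspace = (PySem.Chars.strip r).reverse := by
  constructor
  · rw [List.dropWhile_eq_self_iff]
    intro hl
    have hpre : PySem.Chars.strip r <+: PySem.Chars.lstrip r := by
      simp only [PySem.Chars.strip, PySem.Chars.rstrip]
      have h := List.dropWhile_suffix (l := (PySem.Chars.lstrip r).reverse) PySem.Chars.isspace
      have := List.reverse_prefix.mpr h
      simpa using this
    obtain ⟨w, hw⟩ := hpre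
    have hne : PySem.Chars.lstrip r ≠ [] := by
      intro h; rw [h] at hw; simp at hw
      exact absurd hw.1 (by intro h'; rw [h'] at hl; simp at hl)
    have hlt : 0 < (PySem.Chars.lstrip r).length := by
      rw [← hw]; simp only [List.length_append]; omega
    have hL : PySem.Chars.isspace ((PySem.Chars.lstrip r).head hne) = false :=
      List.head_dropWhile_not PySem.Chars.isspace (by simpa [PySem.Chars.lstrip] using hne)
    rw [List.head_eq_getElem] at hL
    have key : (PySem.Chars.strip r ++ w)[0]'(by simp only [List.length_append]; omega) =
        (PySem.Chars.strip r)[0]'hl := List.getElem_append_left hl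
    simp only [hw] at key
    rw [← key, hL]
    simp
  · simp only [PySem.Chars.strip, PySem.Chars.rstrip, List.reverse_reverse]
    exact List.dropWhile_idempotent _ _

-- a stripped line containing ' ' splits (maxsplit 1) into exactly two parts
lemma split_two (s : List Char)
    (h1 : s.dropWhile PySem.Chars.isspace = s)
    (h2 : s.reverse.dropWhile PySem.Chars.isspace = s.reverse)
    (hsp : PySem.Chars.isIn [' '] s = true) :
    ∃ k v, PySem.Chars.split₀Max s 1 = [k, v] := by
  have hmem : ' ' ∈ s := by
    have := (PySem.Chars.isIn_iff_infix _ _).mp hsp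
    exact this.sublist.mem (by simp)
  have hne : s ≠ [] := by rintro rfl; simp at hmem
  obtain ⟨a, t, rfl⟩ := List.exists_cons_of_ne_nil hne
  set P : Char → Bool := fun c => !PySem.Chars.isspace c with hP
  set u := (a :: t).dropWhile P with hu
  -- the space lives in the dropWhile-P tail
  have hmu : ' ' ∈ u := by
    have hsplit := List.takeWhile_append_dropWhile (p := P) (l := a :: t)
    rcases List.mem_append.mp (by rw [hsplit]; exact hmem) with h | h
    · have := List.mem_takeWhile_imp h
      simp [hP, PySem.Chars.isspace] at this
    · exact h
  have hune : u ≠ [] := by rintro h; rw [h] at hmu; simp at hmu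
  -- the last character of s is not a space, and it is the last character of u
  have hdu : u.dropWhile PySem.Chars.isspace ≠ [] := by
    intro hnil
    have hall := List.dropWhile_eq_nil_iff.mp hnil
    -- u is a suffix of s, so u.getLast = s.getLast, which is not a space
    have hsuf : u <:+ (a :: t) := List.dropWhile_suffix P
    obtain ⟨w, hw⟩ := hsuf
    have hrev : (a :: t).reverse = u.reverse ++ w.reverse := by
      rw [← hw]; simp
    have hlt : 0 < u.reverse.length := by simpa using List.length_pos_iff.mpr hune
    have key : (u.reverse ++ w.reverse)[0]'(by simp only [List.length_append]; omega) =
        u.reverse[0]'hlt := List.getElem_append_left hlt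
    simp only [← hrev] at key
    have hhead : PySem.Chars.isspace ((a :: t).reverse[0]'(by simp)) = false := by
      have := List.dropWhile_eq_self_iff.mp h2
      simpa using this (by simp)
    rw [key] at hhead
    have : u.reverse[0]'hlt ∈ u := by
      have := List.getElem_mem (l := u.reverse) (n := 0) hlt
      exact List.mem_reverse.mp this
    have := hall _ this
    rw [hhead] at this
    exact Bool.false_ne_true this
  -- now unfold split₀Max twice
  have hgo2 : ∀ (n : Nat) (v : List Char) (acc : List (List Char)), v.dropWhile PySem.Chars.isspace ≠ [] →
      PySem.Chars.split₀Max.go (n+1) 0 v acc = (v.dropWhile PySem.Chars.isspace :: acc).reverse := by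
    intro n v acc hv
    rw [PySem.Chars.split₀Max.go]
    rcases hd : v.dropWhile PySem.Chars.isspace with _ | ⟨x, y⟩
    · exact absurd hd hv
    · simp
  have hgo1 : PySem.Chars.split₀Max (a :: t) 1 =
      PySem.Chars.split₀Max.go (t.length + 1) 0 ((a :: t).dropWhile P) [(a :: t).takeWhile P] := by
    show (if (1:Int) < 0 then _ else PySem.Chars.split₀Max.go ((a :: t).length + 1) (1:Int).toNat (a :: t) []) = _
    rw [if_neg (by norm_num)]
    show PySem.Chars.split₀Max.go (t.length + 1 + 1) 1 (a :: t) [] = _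
    rw [PySem.Chars.split₀Max.go]
    rcases hd : (a :: t).dropWhile PySem.Chars.isspace with _ | ⟨x, y⟩
    · rw [h1] at hd; exact absurd hd (by simp)
    · rw [h1] at hd
      simp only [← hd, hP]
      rfl
  rw [hgo1, hgo2 _ _ _ hdu]
  exact ⟨_, _, rfl⟩

-- B's per-line config update agrees with A's second-loop body on stripped lines
lemma step_agree (s : List Char) (cfg : PySem.Dict (List Char) (List Char))
    (h1 : s.dropWhile PySem.Chars.isspace = s)
    (h2 : s.reverse.dropWhile PySem.Chars.isspace = s.reverse) :
    (if PySem.Chars.isIn [' '] s = true then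
        match PySem.Chars.split₀Max s 1 with
        | [k, v] => cfg.insert k (PySem.Chars.strip v)
        | _ => cfg
      else cfg) = pvAStep2 cfg s := by
  by_cases hsp : PySem.Chars.isIn [' '] s = true
  · obtain ⟨k, v, hkv⟩ := split_two s h1 h2 hsp
    have hne : ¬ (s = [] ∨ s = ['{'] ∨ s = ['}']) := by
      rintro (rfl | rfl | rfl) <;> simp_all <;> revert hsp <;> decide
    simp [pvAStep2, hsp, hne, hkv]
  · simp only [hsp]
    unfold pvAStep2
    by_cases hne : s = [] ∨ s = ['{'] ∨ s = ['}'] <;> simp [hne, hsp]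

-- what the char scan does to one whole (raw) line, as a per-line step
def pvLineStep (st : PySem.Dict (List Char) (List Char) × Int) (line : List Char) :
    PySem.Dict (List Char) (List Char) × Int :=
  let bc := line.foldl pvBraceStep st.2
  let l := PySem.Chars.strip line
  (if bc = 0 ∧ PySem.Chars.isIn [' '] l = true then
      match PySem.Chars.split₀Max l 1 with
      | [k, v] => st.1.insert k (PySem.Chars.strip v)
      | _ => st.1
    else st.1, bc)

-- the char-level scan over t ++ ['\n'], started mid-line with buffer buf (whose braces are
-- already folded into the depth), equals the per-line fold over the '\n'-split of buf ++ t
lemma scan_spec : ∀ (t : List Char) (cfg : PySem.Dict (List Char) (List Char)) (bc : Int)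
    (buf : List Char),
    (t ++ ['\n']).foldl pvBStep (cfg, buf.foldl pvBraceStep bc, buf) =
      (let r := (match pvSplitNL t with
          | h :: rest => (buf ++ h) :: rest
          | [] => [buf]).foldl pvLineStep (cfg, bc)
       (r.1, r.2, [])) := by
  intro t
  induction t with
  | nil =>
    intro cfg bc buf
    simp only [List.nil_append, List.foldl_cons, List.foldl_nil, pvSplitNL, List.append_nil]
    simp [pvBStep, pvLineStep]
  | cons c rest ih =>
    intro cfg bc buf
    simp only [List.cons_append, List.foldl_cons]
    by_cases hc : c = '\n'
    · subst hc
      have hstep : pvBStep (cfg, buf.foldl pvBraceStep bc, buf) '\n' =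
          ((pvLineStep (cfg, bc) buf).1, buf.foldl pvBraceStep bc, []) := by
        simp [pvBStep, pvLineStep]
      rw [hstep]
      have := ih (pvLineStep (cfg, bc) buf).1 ((buf.foldl pvBraceStep bc)) []
      simp only [List.foldl_nil] at this
      rw [this]
      rcases h : pvSplitNL rest with _ | ⟨a, b⟩
      · exact absurd h (pvSplitNL_ne_nil rest)
      · have hl : pvLineStep (cfg, bc) buf = ((pvLineStep (cfg, bc) buf).1, buf.foldl pvBraceStep bc) := by
          simp [pvLineStep]
        simp only [pvSplitNL, h, List.foldl_cons, List.nil_append, ← hl]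
        simp
    · have hstep : pvBStep (cfg, buf.foldl pvBraceStep bc, buf) c =
          (cfg, (buf ++ [c]).foldl pvBraceStep bc, buf ++ [c]) := by
        simp [pvBStep, hc, pvBraceStep, List.foldl_append]
      rw [hstep, ih cfg bc (buf ++ [c])]
      rcases h : pvSplitNL rest with _ | ⟨a, b⟩
      · exact absurd h (pvSplitNL_ne_nil rest)
      · simp [pvSplitNL, hc, h]

-- the block accumulator of A's first loop factors out
lemma fold1_append (ls : List (List Char)) (blk : List (List Char)) (bc : Int) :
    ls.foldl pvAStep1 (blk, bc) =
      (blk ++ (ls.foldl pvAStep1 ([], bc)).1, (ls.foldl pvAStep1 ([], bc)).2) := by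
  induction ls generalizing blk bc with
  | nil => simp
  | cons r t ih =>
    simp only [List.foldl_cons]
    rw [ih, ih ((pvAStep1 ([], bc) r).1)]
    simp only [pvAStep1]
    by_cases h : (r.foldl pvBraceStep bc) = 0 <;> simp [h]

-- main invariant: the per-line fold equals A's two passes over the stripped lines
lemma main_inv (ls : List (List Char)) (bc : Int)
    (cfg : PySem.Dict (List Char) (List Char)) :
    (ls.foldl pvLineStep (cfg, bc)).1 =
      ((ls.map PySem.Chars.strip).foldl pvAStep1 ([], bc)).1.foldl pvAStep2 cfg := by
  induction ls generalizing bc cfg with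
  | nil => rfl
  | cons r t ih =>
    simp only [List.map_cons, List.foldl_cons]
    obtain ⟨h1, h2⟩ := stripped_strip r
    by_cases hz : r.foldl pvBraceStep bc = 0
    · have hst : pvLineStep (cfg, bc) r = (pvAStep2 cfg (PySem.Chars.strip r), 0) := by
        simp only [pvLineStep, hz, true_and]
        rw [step_agree (PySem.Chars.strip r) cfg h1 h2]
      rw [hst, ih]
      simp only [pvAStep1, braceFold_strip, hz, if_pos]
      rw [List.nil_append,
        fold1_append (List.map PySem.Chars.strip t) [PySem.Chars.strip r] 0,
        List.singleton_append, List.foldl_cons]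
    · have hst : pvLineStep (cfg, bc) r = (cfg, r.foldl pvBraceStep bc) := by
        simp only [pvLineStep, hz, false_and, if_false]
      rw [hst, ih]
      simp only [pvAStep1, braceFold_strip, hz, if_neg, not_false_iff]

-- ===== VERDICT (by name: the statement is the Claim_ definition above) =====
theorem parse_config_block_spec : Claim_equal_parse_config_block := by
  intro s _
  unfold Spec_parse_config_block parse_config_block parse_config_block_alt
  simp only []
  have hscan := scan_spec (PySem.Chars.strip s.toList) (PySem.Dict.mk []) 0 []
  simp only [List.foldl_nil] at hscan
  rw [hscan, splitOn_eq_pvSplitNL]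
  rcases h : pvSplitNL (PySem.Chars.strip s.toList) with _ | ⟨a, b⟩
  · exact absurd h (pvSplitNL_ne_nil _)
  · simp only [List.nil_append]
    rw [main_inv]
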